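-- pv_equiv track=rewrite | github.com/krixstin/CS555 | UniqueChecker.py | uniqueFirstNameFam
-- ===== SOURCE A (Python) =====
-- def uniqueFirstNameFam(children, individuals):
--     familychild = []
--     names = []
--     dates = []
--     name = ""
--     date = ""
--
--     for i in children:
--         familychild = individuals['@'+i+'@']
--         name = familychild[0]
--         names.append(name.split()[0])
--         date = familychild[0]
--         dates.append(date.split()[0])
--
--     uniqueN = 0
--     uniqueD = 0
--     uniqueN = len(set(names)) == len(names)
--     uniqueD = len(set(dates)) == len(dates)
--     if uniqueN and uniqueD:
--         return True
--     else:
--         return False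
-- ===== SOURCE B (Python) =====
-- def uniqueFirstNameFam(children, individuals):
--     keys = []
--     for i in children:
--         keys.append(individuals['@'+i+'@'][0].split()[0])
--     keys.sort()
--     for a, b in zip(keys, keys[1:]):
--         if a == b:
--             return False
--     return True
-- ===== Notes on version B (the rewrite author's own statement) =====
-- stated objective: alternative
-- what changed: A builds two (identical) per-child first-word lists and checks each by comparing len(set(..)) to len(..); B collects one key list in a single pass, sorts it, and decides uniqueness by scanning adjacent pairs of the sorted list.
import Mathlib
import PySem

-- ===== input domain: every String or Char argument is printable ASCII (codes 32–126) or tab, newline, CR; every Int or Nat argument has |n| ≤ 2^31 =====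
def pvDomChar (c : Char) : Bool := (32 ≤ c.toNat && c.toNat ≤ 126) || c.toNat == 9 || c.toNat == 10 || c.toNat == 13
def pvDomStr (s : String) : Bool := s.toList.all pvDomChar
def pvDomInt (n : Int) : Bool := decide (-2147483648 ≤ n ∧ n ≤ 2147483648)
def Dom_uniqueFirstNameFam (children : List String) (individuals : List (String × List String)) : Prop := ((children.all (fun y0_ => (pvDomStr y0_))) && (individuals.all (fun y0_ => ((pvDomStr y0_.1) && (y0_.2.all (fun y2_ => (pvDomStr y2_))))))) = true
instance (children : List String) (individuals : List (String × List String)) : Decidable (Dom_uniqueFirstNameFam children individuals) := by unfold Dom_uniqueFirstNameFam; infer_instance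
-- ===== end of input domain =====

-- ===== PORT A =====
-- B replaces the two duplicate set-vs-length cardinality checks by one sort-and-adjacent-scan pass (alternative decomposition).
def uniqueFirstNameFamLoop (individuals : List (String × List String)) :
    List String → List String → List String → Option (List String × List String)
  | [], names, dates => some (names, dates)
  | i :: rest, names, dates =>
    match PySem.Dict.get? ⟨individuals⟩ ("@" ++ i ++ "@") with
    | none => none                                  -- KeyError
    | some familychild =>
      match PySem.List.pyGet? familychild 0 with
      | none => none                                -- IndexError (name = familychild[0])
      | some name =>
        match PySem.List.pyGet? (PySem.Str.split₀ name) 0 with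
        | none => none                              -- IndexError (name.split()[0])
        | some w =>
          match PySem.List.pyGet? familychild 0 with
          | none => none                            -- date = familychild[0]
          | some date =>
            match PySem.List.pyGet? (PySem.Str.split₀ date) 0 with
            | none => none                          -- date.split()[0]
            | some w2 => uniqueFirstNameFamLoop individuals rest (names ++ [w]) (dates ++ [w2])

def uniqueFirstNameFam (children : List String) (individuals : List (String × List String)) : Bool :=
  match uniqueFirstNameFamLoop individuals children [] [] with
  | none => false   -- unreachable under Pre_: the Python raises here
  | some (names, dates) =>
    let uniqueN := decide ((PySem.Set.ofList names).length = names.length)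
    let uniqueD := decide ((PySem.Set.ofList dates).length = dates.length)
    if uniqueN && uniqueD then true else false

-- ===== PORT B =====
def uniqueFirstNameFamAltCollect (individuals : List (String × List String)) :
    List String → List String → Option (List String)
  | [], keys => some keys
  | i :: rest, keys =>
    match PySem.Dict.get? ⟨individuals⟩ ("@" ++ i ++ "@") with
    | none => none
    | some fc =>
      match PySem.List.pyGet? fc 0 with
      | none => none
      | some name =>
        match PySem.List.pyGet? (PySem.Str.split₀ name) 0 with
        | none => none
        | some w => uniqueFirstNameFamAltCollect individuals rest (keys ++ [w])

def uniqueFirstNameFamAltScan : List (String × String) → Bool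
  | [] => true
  | (a, b) :: t => if a == b then false else uniqueFirstNameFamAltScan t

def uniqueFirstNameFam_alt (children : List String) (individuals : List (String × List String)) : Bool :=
  match uniqueFirstNameFamAltCollect individuals children [] with
  | none => false   -- unreachable under Pre_: the Python raises here
  | some keys =>
    let s := PySem.List.sorted keys (fun x => x) false
    uniqueFirstNameFamAltScan (s.zip (PySem.List.slice s (some 1) none))

-- ===== PRECONDITION & SPEC =====
-- Pre_ excludes exactly the inputs where the Python raises: a child whose key '@i@' is missing
-- (KeyError), whose record list is empty (IndexError), or whose first record is all whitespace
-- (IndexError on split()[0]).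
def Pre_uniqueFirstNameFam (children : List String) (individuals : List (String × List String)) : Prop :=
  (children.all (fun i =>
    match PySem.Dict.get? ⟨individuals⟩ ("@" ++ i ++ "@") with
    | none => false
    | some fc =>
      match fc with
      | [] => false
      | name :: _ => !(PySem.Str.split₀ name).isEmpty)) = true

instance (children : List String) (individuals : List (String × List String)) : Decidable (Pre_uniqueFirstNameFam children individuals) := by unfold Pre_uniqueFirstNameFam; infer_instance

def pvWitness_uniqueFirstNameFam : List String × (List (String × List String)) :=
  (["c1", "c2"], [("@c1@", ["Al Smith 1990"]), ("@c2@", ["Bo Smith 1992"])])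

def Spec_uniqueFirstNameFam (children : List String) (individuals : List (String × List String)) (out : Bool) : Prop := out = uniqueFirstNameFam_alt children individuals
instance (children : List String) (individuals : List (String × List String)) (out : Bool) : Decidable (Spec_uniqueFirstNameFam children individuals out) := by unfold Spec_uniqueFirstNameFam; infer_instance

-- ===== CLAIM (what is proved, stated in full; the proofs are below) =====
def Claim_equal_uniqueFirstNameFam : Prop := ∀ (children : List String) (individuals : List (String × List String)), Dom_uniqueFirstNameFam children individuals → Pre_uniqueFirstNameFam children individuals → Spec_uniqueFirstNameFam children individuals (uniqueFirstNameFam children individuals)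

-- ===== LEMMAS AND PROOFS =====

-- A's loop is B's collector run twice (names and dates are built from the identical expression).
theorem loop_eq_collect (individuals : List (String × List String)) :
    ∀ (rest ns ds : List String),
      uniqueFirstNameFamLoop individuals rest ns ds =
        match uniqueFirstNameFamAltCollect individuals rest ns,
              uniqueFirstNameFamAltCollect individuals rest ds with
        | some a, some b => some (a, b)
        | _, _ => none := by
  intro rest
  induction rest with
  | nil => intro ns ds; simp [uniqueFirstNameFamLoop, uniqueFirstNameFamAltCollect]
  | cons i t ih =>
    intro ns ds
    simp only [uniqueFirstNameFamLoop, uniqueFirstNameFamAltCollect]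
    cases h1 : PySem.Dict.get? ⟨individuals⟩ ("@" ++ i ++ "@") with
    | none => rfl
    | some fc =>
      cases h2 : PySem.List.pyGet? fc 0 with
      | none => simp [h2]
      | some name =>
        cases h3 : PySem.List.pyGet? (PySem.Str.split₀ name) 0 with
        | none => simp [h2, h3]
        | some w => simp [h2, h3, ih]

theorem set_len_iff_nodup (ks : List String) :
    (PySem.Set.ofList ks).length = ks.length ↔ ks.Nodup := by
  have hto : (PySem.Set.ofList ks).toFinset = ks.toFinset := by
    ext x; simp [List.mem_toFinset, PySem.Set.mem_ofList]
  have hlen : (PySem.Set.ofList ks).length = ks.toFinset.card := by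
    rw [← hto, List.toFinset_card_of_nodup (PySem.Set.nodup_ofList ks)]
  constructor
  · intro h
    have hcard : ks.toFinset.card = ks.length := by omega
    rw [List.card_toFinset] at hcard
    have hsub : ks.dedup.Sublist ks := List.dedup_sublist ks
    have : ks.dedup = ks := hsub.eq_of_length hcard
    rw [← this]; exact List.nodup_dedup ks
  · intro h
    rw [hlen, List.toFinset_card_of_nodup h]

theorem scan_iff_chain' (s : List String) :
    uniqueFirstNameFamAltScan (s.zip s.tail) = true ↔ List.IsChain (fun a b => a ≠ b) s := by
  induction s with
  | nil => simp [uniqueFirstNameFamAltScan]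
  | cons x t ih =>
    cases t with
    | nil => simp [uniqueFirstNameFamAltScan]
    | cons y u =>
      simp only [List.tail_cons, List.zip_cons_cons, uniqueFirstNameFamAltScan,
        List.isChain_cons_cons]
      by_cases hxy : x = y
      · simp [hxy]
      · have := ih
        simp only [List.tail_cons] at this
        simp [show (x == y) = false by simp [hxy], this, hxy]

theorem chain'_lt_of_ne_le (s : List String) (hne : List.IsChain (fun a b => a ≠ b) s)
    (hle : List.IsChain (fun a b : String => a ≤ b) s) :
    List.IsChain (fun a b : String => a < b) s := by
  induction s with
  | nil => exact List.isChain_nil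
  | cons x t ih =>
    cases t with
    | nil => exact List.isChain_singleton x
    | cons y u =>
      rw [List.isChain_cons_cons] at hne hle ⊢
      exact ⟨lt_of_le_of_ne hle.1 hne.1, ih hne.2 hle.2⟩

theorem sorted_scan_iff_nodup (ks : List String) :
    uniqueFirstNameFamAltScan ((PySem.List.sorted ks (fun x => x) false).zip
      ((PySem.List.sorted ks (fun x => x) false).tail)) = true ↔ ks.Nodup := by
  set s := PySem.List.sorted ks (fun x => x) false with hs
  have hperm : s.Perm ks := PySem.List.sorted_perm ks (fun x => x) false
  rw [scan_iff_chain']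
  constructor
  · intro h
    have hle : List.IsChain (fun a b : String => a ≤ b) s :=
      (PySem.List.sorted_pairwise ks (fun x => x)).isChain
    have hlt := chain'_lt_of_ne_le s h hle
    have hp : s.Pairwise (fun a b : String => a < b) := List.isChain_iff_pairwise.mp hlt
    exact hperm.nodup (hp.imp ne_of_lt)
  · intro h
    exact (hperm.symm.nodup h).isChain

theorem ports_agree (children : List String) (individuals : List (String × List String)) :
    uniqueFirstNameFam children individuals = uniqueFirstNameFam_alt children individuals := by
  unfold uniqueFirstNameFam uniqueFirstNameFam_alt
  rw [loop_eq_collect]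
  cases h : uniqueFirstNameFamAltCollect individuals children [] with
  | none => rfl
  | some keys =>
    simp only [PySem.List.slice_from_one]
    rw [show (decide ((PySem.Set.ofList keys).length = keys.length) &&
          decide ((PySem.Set.ofList keys).length = keys.length)) =
          decide ((PySem.Set.ofList keys).length = keys.length) from Bool.and_self _]
    by_cases hn : keys.Nodup
    · simp [(set_len_iff_nodup keys).mpr hn, (sorted_scan_iff_nodup keys).mpr hn]
    · have h1 : ¬ (PySem.Set.ofList keys).length = keys.length := fun hc => hn ((set_len_iff_nodup keys).mp hc)
      have h2 := (sorted_scan_iff_nodup keys)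
      simp only [h1, decide_false]
      rcases hb : uniqueFirstNameFamAltScan ((PySem.List.sorted keys (fun x => x) false).zip
          ((PySem.List.sorted keys (fun x => x) false).tail)) with _ | _
      · rfl
      · exact absurd (h2.mp hb) hn

-- ===== VERDICT (by name: the statement is the Claim_ definition above) =====
theorem uniqueFirstNameFam_spec : Claim_equal_uniqueFirstNameFam := by
  intro children individuals _ _
  unfold Spec_uniqueFirstNameFam
  exact ports_agree children individuals
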